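-- pv_equiv track=rewrite | github.com/robertvandeneynde/python | nonimportant/liste_personnes_fb.py | convert
-- ===== SOURCE A (Python) =====
-- def convert(string):
--     lines = string.split('\n')
--     i = 0
--     for l in lines:
--         if l.strip() == '' or l == 'Ami(e)Amis':
--             pass
--         else:
--             if i % 2 == 0:
--                 yield l
--             i += 1
-- ===== SOURCE B (Python) =====
-- def convert(string):
--     kept = [l for l in string.split('\n')
--             if l.strip() != '' and l != 'Ami(e)Amis']
--     yield from kept[::2]
-- ===== Notes on version B (the rewrite author's own statement) =====
-- stated objective: simpler
-- what changed: Replaces the interleaved single pass with a parity counter by a two-stage decomposition: build the filtered list of kept lines, then yield every other one with a [::2] slice.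
import Mathlib
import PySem

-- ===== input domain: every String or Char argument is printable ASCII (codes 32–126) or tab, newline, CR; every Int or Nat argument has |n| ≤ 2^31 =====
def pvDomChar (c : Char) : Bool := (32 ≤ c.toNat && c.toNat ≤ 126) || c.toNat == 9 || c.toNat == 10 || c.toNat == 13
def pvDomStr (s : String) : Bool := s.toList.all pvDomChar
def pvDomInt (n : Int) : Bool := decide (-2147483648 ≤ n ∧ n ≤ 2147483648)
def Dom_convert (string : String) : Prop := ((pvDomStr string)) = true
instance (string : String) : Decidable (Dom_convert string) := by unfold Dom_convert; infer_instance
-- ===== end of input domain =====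

-- B replaces A's single pass with an interleaved parity counter by two stages: filter the kept lines, then take kept[::2]; objective: simpler.

-- ===== PORT A =====
-- one pass: skip blank/'Ami(e)Amis' lines, yield the kept line when the counter i is even
def convert (string : String) : List String :=
  let lines := (PySem.Str.split? string "\n").getD []
  (lines.foldl
    (fun (st : List String × Int) l =>
      if PySem.Str.strip l == "" || l == "Ami(e)Amis" then st
      else ((if PySem.Int.mod st.2 2 == 0 then st.1 ++ [l] else st.1), st.2 + 1))
    ([], 0)).1

-- ===== PORT B =====
-- two stages: kept = [l for l in lines if l.strip() != '' and l != 'Ami(e)Amis']; then kept[::2]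
def convert_alt (string : String) : List String :=
  let kept := ((PySem.Str.split? string "\n").getD []).filter
      (fun l => !(PySem.Str.strip l == "") && !(l == "Ami(e)Amis"))
  (PySem.List.slice? kept none none 2).getD []

-- ===== PRECONDITION & SPEC =====
def Spec_convert (string : String) (out : List String) : Prop := out = convert_alt string
instance (string : String) (out : List String) : Decidable (Spec_convert string out) := by unfold Spec_convert; infer_instance

-- ===== CLAIM (what is proved, stated in full; the proofs are below) =====
def Claim_equal_convert : Prop := ∀ (string : String), Dom_convert string → Spec_convert string (convert string)

-- ===== LEMMAS AND PROOFS =====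

theorem pv_slice_filterMap {α : Type} (xs : List α) :
    PySem.List.slice? xs none none 2 = some (List.filterMap (fun k : Nat => xs[2*k]?) (List.range ((xs.length + 1) / 2))) := by
  simp [PySem.List.slice?, PySem.List.sliceIndices]
  have h : (if 0 < xs.length then (((xs.length : Int) + 2 - 1) / 2).toNat else 0) = (xs.length + 1) / 2 := by
    split <;> omega
  rw [h]
  apply List.filterMap_congr
  intro k _
  congr 1

/-- every other element, starting with the first -/
def pvEO {α : Type} : List α → List α
  | [] => []
  | [x] => [x]
  | x :: _ :: rest => x :: pvEO rest

theorem pv_filterMap_eo {α : Type} (xs : List α) :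
    List.filterMap (fun k : Nat => xs[2*k]?) (List.range ((xs.length + 1) / 2)) = pvEO xs := by
  induction xs using pvEO.induct with
  | case1 => simp [pvEO]
  | case2 x => simp [pvEO]
  | case3 x y rest ih =>
    have hlen : (((x :: y :: rest).length + 1) / 2) = (rest.length + 1) / 2 + 1 := by
      simp [List.length_cons]; omega
    rw [hlen, List.range_succ_eq_map]
    rw [List.filterMap_cons, List.filterMap_map]
    have h0 : (x :: y :: rest)[2*(0:Nat)]? = some x := rfl
    rw [h0]
    simp only [Function.comp]
    have harg : ∀ k : Nat, (x :: y :: rest)[2*(k+1)]? = rest[2*k]? := by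
      intro k
      have : 2*(k+1) = 2*k + 1 + 1 := by omega
      rw [this]
      simp
    rw [List.filterMap_congr (fun k _ => harg k)]
    rw [ih]
    rfl

/-- take every other element; the Bool says whether the next element is taken -/
def pvSel {α : Type} : Bool → List α → List α
  | _, [] => []
  | true, x :: xs => x :: pvSel false xs
  | false, _ :: xs => pvSel true xs

theorem pvEO_eq_sel {α : Type} (xs : List α) : pvEO xs = pvSel true xs := by
  induction xs using pvEO.induct with
  | case1 => rfl
  | case2 x => rfl
  | case3 x y rest ih => simp [pvEO, pvSel, ih]

def pvKeep (l : String) : Bool := !(PySem.Str.strip l == "") && !(l == "Ami(e)Amis")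

theorem pvEven_succ (i : Int) : (PySem.Int.mod (i+1) 2 == 0) = !(PySem.Int.mod i 2 == 0) := by
  simp only [PySem.Int.mod, Int.fmod_eq_emod]
  rcases Int.emod_two_eq_zero_or_one i with h | h
  · have h2 : (i+1) % 2 = 1 := by omega
    simp [h, h2]
  · have h2 : (i+1) % 2 = 0 := by omega
    simp [h, h2]

theorem pv_loop (lines : List String) : ∀ (acc : List String) (i : Int),
    (lines.foldl
      (fun (st : List String × Int) l =>
        if PySem.Str.strip l == "" || l == "Ami(e)Amis" then st
        else ((if PySem.Int.mod st.2 2 == 0 then st.1 ++ [l] else st.1), st.2 + 1))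
      (acc, i)).1 = acc ++ pvSel (PySem.Int.mod i 2 == 0) (lines.filter pvKeep) := by
  induction lines with
  | nil => intro acc i; simp [pvSel]
  | cons l rest ih =>
    intro acc i
    by_cases hk : pvKeep l = true
    · have hcond : (PySem.Str.strip l == "" || l == "Ami(e)Amis") = false := by
        simp only [pvKeep, Bool.and_eq_true, Bool.not_eq_true'] at hk
        simp [hk.1, hk.2]
      simp only [List.foldl_cons, List.filter_cons, hk, hcond, if_neg Bool.false_ne_true, if_true]
      rw [ih, pvEven_succ]
      cases h : (PySem.Int.mod i 2 == 0) <;> simp [pvSel]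
    · have hcond : (PySem.Str.strip l == "" || l == "Ami(e)Amis") = true := by
        simp only [pvKeep, Bool.and_eq_true, Bool.not_eq_true'] at hk
        rcases Bool.eq_false_or_eq_true (PySem.Str.strip l == "") with h | h
        · simp [h]
        · have h2 : (l == "Ami(e)Amis") = true := by
            rcases Bool.eq_false_or_eq_true (l == "Ami(e)Amis") with h2 | h2
            · exact h2
            · exact absurd ⟨h, h2⟩ hk
          simp [h2]
      simp only [Bool.not_eq_true] at hk
      simp only [List.foldl_cons, List.filter_cons, hcond, hk, if_true]
      exact ih acc i

-- ===== VERDICT (by name: the statement is the Claim_ definition above) =====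
theorem convert_spec : Claim_equal_convert := by
  intro s _
  show convert s = convert_alt s
  simp only [convert, convert_alt]
  rw [pv_slice_filterMap, pv_filterMap_eo, Option.getD_some, pvEO_eq_sel, pv_loop]
  have h0 : (PySem.Int.mod 0 2 == 0) = true := rfl
  rw [h0]
  unfold pvKeep
  simp
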